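-- pv_equiv track=rewrite | github.com/SpiNNakerManchester/PACMAN | pacman/utilities/file_format_converters/convert_to_memory_placements.py | _valid_constraints_for_external_device
-- ===== SOURCE A (Python) =====
-- def _valid_constraints_for_external_device(constraints_for_vertex):
--     """
--     search for the constraint pattern which represetns a external device
--     :param constraints_for_vertex: constraints for a vertex
--     :return: bool
--     """
--     found_route_end_point = None
--     found_placement_constraint = None
--     for constraint in constraints_for_vertex:
--         if constraint['type'] == "location":
--             found_placement_constraint = constraint
--         if constraint['type'] == "route_endpoint":
--             found_route_end_point = constraint
--     if (found_placement_constraint is not None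
--             and found_route_end_point is not None):
--         return {'end_point': found_route_end_point,
--                 'placement': found_placement_constraint}
--     else:
--         return {}
-- ===== SOURCE B (Python) =====
-- def _valid_constraints_for_external_device(constraints_for_vertex):
--     def last_of(kind):
--         # first match from the end == last match of A's forward overwrite
--         for c in reversed(constraints_for_vertex):
--             if c['type'] == kind:
--                 return c
--         return None
--     placement = last_of('location')
--     end_point = last_of('route_endpoint')
--     if placement is not None and end_point is not None:
--         return {'end_point': end_point, 'placement': placement}
--     return {}
-- ===== Notes on version B (the rewrite author's own statement) =====
-- stated objective: alternative
-- what changed: Replaces A's single forward pass with two Option accumulators by two staged backward searches (first match from the end, early exit) for each constraint type.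
import Mathlib
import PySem

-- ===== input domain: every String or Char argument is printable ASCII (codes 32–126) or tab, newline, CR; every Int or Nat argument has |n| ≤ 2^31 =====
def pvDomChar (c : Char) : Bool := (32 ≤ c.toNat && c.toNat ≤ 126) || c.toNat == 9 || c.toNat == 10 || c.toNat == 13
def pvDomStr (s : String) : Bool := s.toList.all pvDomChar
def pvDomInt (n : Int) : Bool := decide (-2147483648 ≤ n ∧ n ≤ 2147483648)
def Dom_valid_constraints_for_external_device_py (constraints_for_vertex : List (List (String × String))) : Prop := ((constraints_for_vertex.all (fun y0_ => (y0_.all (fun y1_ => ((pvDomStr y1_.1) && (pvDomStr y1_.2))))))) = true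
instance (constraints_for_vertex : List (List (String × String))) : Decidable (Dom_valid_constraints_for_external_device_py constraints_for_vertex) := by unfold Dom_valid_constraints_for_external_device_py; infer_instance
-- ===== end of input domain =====

-- B replaces A's single forward pass with two Option accumulators by two staged
-- backward searches (first match from the end, early exit) for each type; same O(n) cost.

-- ===== PORT A =====
-- A's loop body: constraint['type'] is a first-match dict lookup; on a constraint without
-- a 'type' key Python raises KeyError (excluded by Pre_), here the comparison is false.
def pvStepA (st : Option (List (String × String)) × Option (List (String × String)))
    (constraint : List (String × String)) :
    Option (List (String × String)) × Option (List (String × String)) :=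
  let st := if (PySem.Dict.mk constraint).get? "type" == some "location"
            then (st.1, some constraint) else st
  if (PySem.Dict.mk constraint).get? "type" == some "route_endpoint"
  then (some constraint, st.2) else st

def valid_constraints_for_external_device_py (constraints_for_vertex : List (List (String × String))) : List (String × List (String × String)) :=
  let st := constraints_for_vertex.foldl pvStepA (none, none)
  match st with
  | (some e, some p) => [("end_point", e), ("placement", p)]
  | _ => []

-- ===== PORT B =====
-- Source B's last_of: linear search with early return over the reversed list.
def pvLastOf (kind : String) : List (List (String × String)) → Option (List (String × String))
  | [] => none
  | c :: cs =>
    if (PySem.Dict.mk c).get? "type" == some kind then some c else pvLastOf kind cs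

def valid_constraints_for_external_device_py_alt (constraints_for_vertex : List (List (String × String))) : List (String × List (String × String)) :=
  let placement := pvLastOf "location" constraints_for_vertex.reverse
  let end_point := pvLastOf "route_endpoint" constraints_for_vertex.reverse
  match placement with
  | none => []
  | some p =>
    match end_point with
    | none => []
    | some e => [("end_point", e), ("placement", p)]

-- ===== PRECONDITION & SPEC =====
-- Pre_ excludes constraints with no 'type' key, on which Python A raises KeyError.
def Pre_valid_constraints_for_external_device_py (constraints_for_vertex : List (List (String × String))) : Prop :=
  constraints_for_vertex.all (fun c => c.any (fun p => p.1 == "type")) = true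
instance (constraints_for_vertex : List (List (String × String))) : Decidable (Pre_valid_constraints_for_external_device_py constraints_for_vertex) := by unfold Pre_valid_constraints_for_external_device_py; infer_instance

def pvWitness_valid_constraints_for_external_device_py : (List (List (String × String))) :=
  [[("type", "location"), ("x", "3")], [("type", "route_endpoint")]]

def Spec_valid_constraints_for_external_device_py (constraints_for_vertex : List (List (String × String))) (out : List (String × List (String × String))) : Prop := out = valid_constraints_for_external_device_py_alt constraints_for_vertex
instance (constraints_for_vertex : List (List (String × String))) (out : List (String × List (String × String))) : Decidable (Spec_valid_constraints_for_external_device_py constraints_for_vertex out) := by unfold Spec_valid_constraints_for_external_device_py; infer_instance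

-- ===== CLAIM =====
def Claim_equal_valid_constraints_for_external_device_py : Prop := ∀ (constraints_for_vertex : List (List (String × String))), Dom_valid_constraints_for_external_device_py constraints_for_vertex → Pre_valid_constraints_for_external_device_py constraints_for_vertex → Spec_valid_constraints_for_external_device_py constraints_for_vertex (valid_constraints_for_external_device_py constraints_for_vertex)

-- ===== LEMMAS AND PROOFS =====

lemma pvLastOf_append (k : String) (l l' : List (List (String × String))) :
    pvLastOf k (l ++ l') = (pvLastOf k l).or (pvLastOf k l') := by
  induction l with
  | nil => rfl
  | cons c cs ih =>
    simp only [List.cons_append, pvLastOf, ih]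
    split <;> simp

-- A's fold equals the two backward searches, seeded by the initial state.
lemma pv_fold_eq (cs : List (List (String × String)))
    (st : Option (List (String × String)) × Option (List (String × String))) :
    cs.foldl pvStepA st =
      ((pvLastOf "route_endpoint" cs.reverse).or st.1,
       (pvLastOf "location" cs.reverse).or st.2) := by
  induction cs generalizing st with
  | nil => simp [pvLastOf]
  | cons c cs ih =>
    simp only [List.foldl_cons, ih, List.reverse_cons, pvLastOf_append]
    simp only [pvStepA, pvLastOf]
    rcases (PySem.Dict.mk c).get? "type" with _ | s
    · simp
    · rcases eq_or_ne s "route_endpoint" with h1 | h1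
      · subst h1; simp
      · rcases eq_or_ne s "location" with h2 | h2
        · subst h2; simp
        · simp [h1, h2]

-- ===== VERDICT =====
theorem valid_constraints_for_external_device_py_spec : Claim_equal_valid_constraints_for_external_device_py := by
  intro cs _ _
  show valid_constraints_for_external_device_py cs = valid_constraints_for_external_device_py_alt cs
  simp only [valid_constraints_for_external_device_py, valid_constraints_for_external_device_py_alt,
    pv_fold_eq, Option.or_none]
  rcases pvLastOf "route_endpoint" cs.reverse with _ | e <;>
    rcases pvLastOf "location" cs.reverse with _ | p <;> rfl
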